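-- pv_equiv track=rewrite | github.com/JaySDSU/LeetCode | RobotEncircular.py | encircular
-- ===== SOURCE A (Python) =====
-- N = 0
--
-- E = 1
--
-- S = 2
--
-- def encircular(instructions: str) -> bool:
--     instructions = instructions*4
--     x,y = 0,0
--     dir = N
--     for ins in instructions:
--         if ins == 'L':
--             dir = (4 + dir - 1)% 4
--         if ins == 'R':
--             dir = (dir + 1)%4
--         else:
--             if dir == N:
--                 y += 1
--             elif dir == E:
--                 x -= 1
--             elif dir == S:
--                 y -= 1
--             else:
--                 x += 1
--     return (x==0 and y==0)
-- ===== SOURCE B (Python) =====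
-- def _rotk(d, p):
--     # rotate p by the 90-degree rotation (x, y) -> (-y, x), d times (d in 0..3)
--     for _ in range(d):
--         p = (-p[1], p[0])
--     return p
--
-- def encircular(instructions: str) -> bool:
--     # One pass over the instructions (preserving the original rule that 'L'
--     # turns left AND moves, 'R' only turns, anything else moves), then sum
--     # the four rotated copies of the net displacement in closed form.
--     x = y = 0
--     d = 0
--     deltas = [(0, 1), (-1, 0), (0, -1), (1, 0)]
--     for ins in instructions:
--         if ins == 'L':
--             d = (d - 1) % 4
--         if ins == 'R':
--             d = (d + 1) % 4
--         else:
--             dx, dy = deltas[d]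
--             x += dx
--             y += dy
--     c0 = (x, y)
--     c1 = _rotk(d, c0)
--     c2 = _rotk(d, c1)
--     c3 = _rotk(d, c2)
--     return (c0[0] + c1[0] + c2[0] + c3[0] == 0
--             and c0[1] + c1[1] + c2[1] + c3[1] == 0)
-- ===== Notes on version B (the rewrite author's own statement) =====
-- stated objective: faster
-- what changed: B simulates the instruction string once (keeping A's exact rule: 'L' turns left and moves, 'R' only turns, any other char moves) and then sums the four rotated copies of the net displacement in closed form, instead of A's literal simulation of the string concatenated four times.
import Mathlib
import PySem

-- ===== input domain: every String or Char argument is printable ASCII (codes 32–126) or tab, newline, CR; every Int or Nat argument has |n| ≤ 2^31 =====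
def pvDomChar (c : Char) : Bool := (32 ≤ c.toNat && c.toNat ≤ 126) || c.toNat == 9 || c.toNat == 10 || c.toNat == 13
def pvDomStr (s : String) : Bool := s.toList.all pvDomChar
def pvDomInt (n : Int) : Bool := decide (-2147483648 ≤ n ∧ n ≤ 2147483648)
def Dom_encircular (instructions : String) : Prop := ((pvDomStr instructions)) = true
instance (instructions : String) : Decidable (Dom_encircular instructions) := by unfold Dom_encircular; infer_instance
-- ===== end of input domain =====

-- ===== PORT A =====
-- literal port of A: simulate instructions*4 from (0,0) facing N=0
def stepA (st : Int × Int × Int) (c : Char) : Int × Int × Int :=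
  let d1 := if c = 'L' then PySem.Int.mod (4 + st.2.2 - 1) 4 else st.2.2
  if c = 'R' then (st.1, st.2.1, PySem.Int.mod (d1 + 1) 4)
  else if d1 = 0 then (st.1, st.2.1 + 1, d1)
  else if d1 = 1 then (st.1 - 1, st.2.1, d1)
  else if d1 = 2 then (st.1, st.2.1 - 1, d1)
  else (st.1 + 1, st.2.1, d1)

def encircular (instructions : String) : Bool :=
  let s := instructions ++ instructions ++ instructions ++ instructions
  let r := s.toList.foldl stepA (0, 0, 0)
  decide (r.1 = 0 ∧ r.2.1 = 0)

-- ===== PORT B =====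
-- one pass (same rule as A: 'L' turns and moves, 'R' only turns, anything
-- else moves), then the closed-form sum of the four rotated displacement copies
def pvRot (p : Int × Int) : Int × Int := (-p.2, p.1)

def pvRotk (d : Int) (p : Int × Int) : Int × Int := pvRot^[d.toNat] p

def stepB (st : Int × Int × Int) (c : Char) : Int × Int × Int :=
  let d := if c = 'L' then PySem.Int.mod (st.2.2 - 1) 4 else st.2.2
  if c = 'R' then (st.1, st.2.1, PySem.Int.mod (d + 1) 4)
  else
    let p := (PySem.List.pyGet? [((0:Int),(1:Int)), (-1,0), (0,-1), (1,0)] d).getD (0,0)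
    (st.1 + p.1, st.2.1 + p.2, d)

def encircular_alt (instructions : String) : Bool :=
  let r := instructions.toList.foldl stepB (0, 0, 0)
  let d := r.2.2
  let c0 := (r.1, r.2.1)
  let c1 := pvRotk d c0
  let c2 := pvRotk d c1
  let c3 := pvRotk d c2
  decide (c0.1 + c1.1 + c2.1 + c3.1 = 0 ∧ c0.2 + c1.2 + c2.2 + c3.2 = 0)

-- ===== PRECONDITION & SPEC =====
def Spec_encircular (instructions : String) (out : Bool) : Prop := out = encircular_alt instructions
instance (instructions : String) (out : Bool) : Decidable (Spec_encircular instructions out) := by unfold Spec_encircular; infer_instance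

-- ===== CLAIM (what is proved, stated in full; the proofs are below) =====
def Claim_equal_encircular : Prop := ∀ (instructions : String), Dom_encircular instructions → Spec_encircular instructions (encircular instructions)

-- ===== LEMMAS AND PROOFS =====

lemma rotk0 (p : Int × Int) : pvRotk 0 p = p := by simp [pvRotk]

lemma rotk1 (p : Int × Int) : pvRotk 1 p = (-p.2, p.1) := by
  simp [pvRotk, pvRot]

lemma rotk2 (p : Int × Int) : pvRotk 2 p = (-p.1, -p.2) := by
  show pvRot^[(2:Nat)] p = _
  simp [Function.iterate_succ_apply, pvRot]

lemma rotk3 (p : Int × Int) : pvRotk 3 p = (p.2, -p.1) := by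
  show pvRot^[(3:Nat)] p = _
  simp [Function.iterate_succ_apply, pvRot]

lemma hmod4 (a : Int) : PySem.Int.mod a 4 = a % 4 :=
  PySem.Int.mod_eq_emod_of_pos (by norm_num)

lemma step_eq (x y d : Int) (c : Char) (h0 : 0 ≤ d) (h4 : d < 4) :
    stepA (x, y, d) c = stepB (x, y, d) c := by
  by_cases hc : c = 'L' <;> by_cases hr : c = 'R'
  · subst hc; exact absurd hr (by decide)
  all_goals
    interval_cases d <;>
      norm_num [stepA, stepB, hc, hr, PySem.List.pyGet?, PySem.List.pyIdx?,
        show (('L':Char) = 'R') = False from by decide,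
        show (('R':Char) = 'L') = False from by decide,
        show Int.toNat 0 = 0 from rfl, show Int.toNat 1 = 1 from rfl,
        show Int.toNat 2 = 2 from rfl, show Int.toNat 3 = 3 from rfl,
        sub_eq_add_neg,
        show PySem.Int.mod (-1:Int) 4 = 3 from by decide,
        show PySem.Int.mod (0:Int) 4 = 0 from by decide,
        show PySem.Int.mod (1:Int) 4 = 1 from by decide,
        show PySem.Int.mod (2:Int) 4 = 2 from by decide,
        show PySem.Int.mod (3:Int) 4 = 3 from by decide,
        show PySem.Int.mod (4:Int) 4 = 0 from by decide,
        show PySem.Int.mod (5:Int) 4 = 1 from by decide,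
        show PySem.Int.mod (6:Int) 4 = 2 from by decide]

lemma step_range (x y d : Int) (c : Char) (h0 : 0 ≤ d) (h4 : d < 4) :
    0 ≤ (stepB (x, y, d) c).2.2 ∧ (stepB (x, y, d) c).2.2 < 4 := by
  by_cases hc : c = 'L' <;> by_cases hr : c = 'R'
  · subst hc; exact absurd hr (by decide)
  all_goals
    interval_cases d <;>
      norm_num [stepB, hc, hr, PySem.List.pyGet?, PySem.List.pyIdx?,
        show (('L':Char) = 'R') = False from by decide,
        show (('R':Char) = 'L') = False from by decide,
        show Int.toNat 0 = 0 from rfl, show Int.toNat 1 = 1 from rfl,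
        show Int.toNat 2 = 2 from rfl, show Int.toNat 3 = 3 from rfl,
        show PySem.Int.mod (-1:Int) 4 = 3 from by decide,
        show PySem.Int.mod (0:Int) 4 = 0 from by decide,
        show PySem.Int.mod (1:Int) 4 = 1 from by decide,
        show PySem.Int.mod (2:Int) 4 = 2 from by decide,
        show PySem.Int.mod (3:Int) 4 = 3 from by decide,
        show PySem.Int.mod (4:Int) 4 = 0 from by decide]

lemma fold_range (l : List Char) : ∀ x y d : Int, 0 ≤ d → d < 4 →
    0 ≤ (l.foldl stepB (x, y, d)).2.2 ∧ (l.foldl stepB (x, y, d)).2.2 < 4 := by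
  induction l with
  | nil => intro x y d h0 h4; simpa using ⟨h0, h4⟩
  | cons c l ih =>
    intro x y d h0 h4
    have h := step_range x y d c h0 h4
    have : stepB (x, y, d) c = ((stepB (x, y, d) c).1, (stepB (x, y, d) c).2.1, (stepB (x, y, d) c).2.2) := rfl
    simp only [List.foldl_cons]
    rw [this]
    exact ih _ _ _ h.1 h.2

lemma fold_AB (l : List Char) : ∀ x y d : Int, 0 ≤ d → d < 4 →
    l.foldl stepA (x, y, d) = l.foldl stepB (x, y, d) := by
  induction l with
  | nil => intro _ _ _ _ _; rfl
  | cons c l ih =>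
    intro x y d h0 h4
    have h := step_range x y d c h0 h4
    have he := step_eq x y d c h0 h4
    have hsplit : stepB (x, y, d) c = ((stepB (x, y, d) c).1, (stepB (x, y, d) c).2.1, (stepB (x, y, d) c).2.2) := rfl
    simp only [List.foldl_cons, he]
    rw [hsplit, ih _ _ _ h.1 h.2, ← hsplit]

-- covariance: a pass of B from a translated/rotated start state
lemma fold_main (l : List Char) : ∀ x y s : Int, 0 ≤ s → s < 4 →
    l.foldl stepB (x, y, s) =
      (x + (pvRotk s ((l.foldl stepB (0, 0, 0)).1, (l.foldl stepB (0, 0, 0)).2.1)).1,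
       y + (pvRotk s ((l.foldl stepB (0, 0, 0)).1, (l.foldl stepB (0, 0, 0)).2.1)).2,
       PySem.Int.mod (s + (l.foldl stepB (0, 0, 0)).2.2) 4) := by
  induction l with
  | nil =>
    intro x y s h0 h4
    simp only [List.foldl_nil]
    interval_cases s <;>
      simp [rotk0, rotk1, rotk2, rotk3]
  | cons c l ih =>
    intro x y s h0 h4
    rcases hR : l.foldl stepB (0, 0, 0) with ⟨a, b, e⟩
    simp only [hR] at ih
    have i0 := fun x y => ih x y 0 (by norm_num) (by norm_num)
    have i1 := fun x y => ih x y 1 (by norm_num) (by norm_num)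
    have i2 := fun x y => ih x y 2 (by norm_num) (by norm_num)
    have i3 := fun x y => ih x y 3 (by norm_num) (by norm_num)
    simp only [List.foldl_cons]
    by_cases hc : c = 'L' <;> by_cases hr : c = 'R'
    · subst hc; exact absurd hr (by decide)
    all_goals
      interval_cases s <;>
        (norm_num [stepB, hc, hr, PySem.List.pyGet?, PySem.List.pyIdx?,
          show (('L':Char) = 'R') = False from by decide,
          show (('R':Char) = 'L') = False from by decide,
          show Int.toNat 0 = 0 from rfl, show Int.toNat 1 = 1 from rfl,
          show Int.toNat 2 = 2 from rfl, show Int.toNat 3 = 3 from rfl,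
          show PySem.Int.mod (-1:Int) 4 = 3 from by decide,
          show PySem.Int.mod (0:Int) 4 = 0 from by decide,
          show PySem.Int.mod (1:Int) 4 = 1 from by decide,
          show PySem.Int.mod (2:Int) 4 = 2 from by decide,
          show PySem.Int.mod (3:Int) 4 = 3 from by decide,
          show PySem.Int.mod (4:Int) 4 = 0 from by decide]
         simp only [i0, i1, i2, i3]
         simp only [rotk0, rotk1, rotk2, rotk3, hmod4, Prod.mk.injEq]
         refine ⟨by ring, by ring, by omega⟩)

-- ===== VERDICT (by name: the statement is the Claim_ definition above) =====
theorem encircular_spec : Claim_equal_encircular := by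
  intro instr _
  unfold Spec_encircular encircular encircular_alt
  simp only [String.toList_append, List.foldl_append]
  rcases hR : instr.toList.foldl stepB (0, 0, 0) with ⟨a, b, e⟩
  have hrange := fold_range instr.toList 0 0 0 (by norm_num) (by norm_num)
  rw [hR] at hrange
  have hM := fold_main instr.toList
  simp only [hR] at hM
  have step1 : ∀ x y s : Int, 0 ≤ s → s < 4 →
      instr.toList.foldl stepA (x, y, s) =
        (x + (pvRotk s (a, b)).1, y + (pvRotk s (a, b)).2, PySem.Int.mod (s + e) 4) :=
    fun x y s h0 h4 => (fold_AB instr.toList x y s h0 h4).trans (hM x y s h0 h4)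
  rw [fold_AB instr.toList 0 0 0 (by norm_num) (by norm_num), hR]
  obtain ⟨he0, he4⟩ := hrange
  simp only at he0 he4
  have j0 := fun x y => step1 x y 0 (by norm_num) (by norm_num)
  have j1 := fun x y => step1 x y 1 (by norm_num) (by norm_num)
  have j2 := fun x y => step1 x y 2 (by norm_num) (by norm_num)
  have j3 := fun x y => step1 x y 3 (by norm_num) (by norm_num)
  interval_cases e <;>
    (norm_num [j0, j1, j2, j3, rotk0, rotk1, rotk2, rotk3,
        show PySem.Int.mod (0:Int) 4 = 0 from by decide,
        show PySem.Int.mod (1:Int) 4 = 1 from by decide,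
        show PySem.Int.mod (2:Int) 4 = 2 from by decide,
        show PySem.Int.mod (3:Int) 4 = 3 from by decide,
        show PySem.Int.mod (4:Int) 4 = 0 from by decide,
        show PySem.Int.mod (5:Int) 4 = 1 from by decide,
        show PySem.Int.mod (6:Int) 4 = 2 from by decide,
        decide_eq_decide])
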